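-- pv_equiv track=rewrite | github.com/Ayush-2928/AI-Dashboard-Chatbot | test_data_2.py | _pick_month_column
-- ===== SOURCE A (Python) =====
-- def _pick_month_column(columns):
--     if not columns:
--         return None
--     col_map = {str(c).strip().lower(): str(c).strip() for c in columns}
--     for cand in ["date", "monthly", "yyyy_mm", "month"]:
--         hit = col_map.get(cand)
--         if hit:
--             return hit
--     for c in columns:
--         n = str(c).strip().lower()
--         if "date" in n or "month" in n:
--             return str(c).strip()
--     return None
-- ===== SOURCE B (Python) =====
-- def _pick_month_column(columns):
--     if not columns:
--         return None
--     cands = ["date", "monthly", "yyyy_mm", "month"]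
--     best_rank = 4
--     best_exact = None
--     first_sub = None
--     for c in columns:
--         s = str(c).strip()
--         n = s.lower()
--         if n in cands:
--             r = cands.index(n)
--             if r <= best_rank:
--                 best_rank = r
--                 best_exact = s
--         if first_sub is None and ("date" in n or "month" in n):
--             first_sub = s
--     return best_exact if best_exact is not None else first_sub
-- ===== Notes on version B (the rewrite author's own statement) =====
-- stated objective: alternative
-- what changed: A builds a normalized->stripped dict, probes it for four candidates, then rescans for a substring match; B is a single loop over the columns carrying two accumulators (best exact hit by candidate rank with last-wins updates, first substring hit), with no dict and no second scan.
import Mathlib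
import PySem

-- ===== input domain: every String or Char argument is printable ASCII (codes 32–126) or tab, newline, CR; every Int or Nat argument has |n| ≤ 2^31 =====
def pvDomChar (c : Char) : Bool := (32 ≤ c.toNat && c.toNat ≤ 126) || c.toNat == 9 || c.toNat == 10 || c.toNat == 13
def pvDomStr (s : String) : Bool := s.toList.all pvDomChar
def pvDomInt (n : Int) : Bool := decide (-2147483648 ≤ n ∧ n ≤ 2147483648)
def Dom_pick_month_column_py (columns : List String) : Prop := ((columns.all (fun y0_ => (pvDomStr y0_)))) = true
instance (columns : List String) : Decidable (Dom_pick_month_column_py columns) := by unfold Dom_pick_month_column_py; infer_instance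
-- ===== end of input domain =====

-- B replaces A's dict index plus two sequential scans by a single pass carrying two
-- accumulators (best exact hit by candidate rank, first substring hit); objective: alternative decomposition.

-- ===== PORT A =====
-- normalized column name: str(c).strip().lower()
def pvNorm (c : String) : String := PySem.Str.lower (PySem.Str.strip c)

-- 'for cand in [...]: hit = col_map.get(cand); if hit: return hit'
def aCandLoop (col_map : PySem.Dict String String) : List String → Option String
  | [] => none
  | cand :: rest =>
    match col_map.get? cand with
    | some hit => if hit ≠ "" then some hit else aCandLoop col_map rest
    | none => aCandLoop col_map rest

-- 'for c in columns: n = str(c).strip().lower(); if "date" in n or "month" in n: return str(c).strip()'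
def aSubLoop : List String → Option String
  | [] => none
  | c :: cs =>
    let n := pvNorm c
    if PySem.Str.isIn "date" n || PySem.Str.isIn "month" n then some (PySem.Str.strip c)
    else aSubLoop cs

def pick_month_column_py (columns : List String) : Option String :=
  if columns = [] then none
  else
    let col_map := columns.foldl (fun d c => d.insert (pvNorm c) (PySem.Str.strip c)) PySem.Dict.empty
    match aCandLoop col_map ["date", "monthly", "yyyy_mm", "month"] with
    | some hit => some hit
    | none => aSubLoop columns

-- ===== PORT B =====
-- one step of B's single loop: state = (best_rank, best_exact, first_sub)
def bStep (st : Int × Option String × Option String) (c : String) : Int × Option String × Option String :=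
  let s := PySem.Str.strip c
  let n := PySem.Str.lower s
  let (br, be, fs) := st
  let (br, be) :=
    match PySem.List.index? ["date", "monthly", "yyyy_mm", "month"] n with
    | some r => if (r : Int) ≤ br then ((r : Int), some s) else (br, be)
    | none => (br, be)
  let fs :=
    match fs with
    | none => if PySem.Str.isIn "date" n || PySem.Str.isIn "month" n then some s else none
    | some _ => fs
  (br, be, fs)

def pick_month_column_py_alt (columns : List String) : Option String :=
  if columns = [] then none
  else
    match columns.foldl bStep (4, none, none) with
    | (_, some s, _) => some s
    | (_, none, fs) => fs

-- ===== PRECONDITION & SPEC =====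
def Spec_pick_month_column_py (columns : List String) (out : Option String) : Prop := out = pick_month_column_py_alt columns
instance (columns : List String) (out : Option String) : Decidable (Spec_pick_month_column_py columns out) := by unfold Spec_pick_month_column_py; infer_instance

-- ===== CLAIM (what is proved, stated in full; the proofs are below) =====
def Claim_equal_pick_month_column_py : Prop := ∀ (columns : List String), Dom_pick_month_column_py columns → Spec_pick_month_column_py columns (pick_month_column_py columns)

-- ===== LEMMAS AND PROOFS =====

-- the value A's dict associates to key k: the LAST column whose normalized name is k
def lastFind (k : String) : List String → Option String
  | [] => none
  | c :: cs =>
    match lastFind k cs with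
    | some v => some v
    | none => if pvNorm c = k then some (PySem.Str.strip c) else none

theorem lastFind_cons_ne {k c : String} (cs : List String) (h : pvNorm c ≠ k) :
    lastFind k (c :: cs) = lastFind k cs := by
  cases hf : lastFind k cs <;> simp [lastFind, hf, h]

theorem lastFind_cons_eq {k c : String} (cs : List String) (h : pvNorm c = k) :
    lastFind k (c :: cs) = some ((lastFind k cs).getD (PySem.Str.strip c)) := by
  cases hf : lastFind k cs <;> simp [lastFind, hf, h]

theorem lastFind_lower {k : String} : ∀ {cs : List String} {v : String},
    lastFind k cs = some v → PySem.Str.lower v = k := by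
  intro cs
  induction cs with
  | nil => intro v h; simp [lastFind] at h
  | cons c cs ih =>
    intro v h
    simp only [lastFind] at h
    cases hf : lastFind k cs with
    | some w => rw [hf] at h; exact ih ((Option.some_inj.mp h) ▸ hf)
    | none =>
      rw [hf] at h
      by_cases hn : pvNorm c = k
      · simp [hn] at h; rw [← h]; exact hn
      · simp [hn] at h

theorem lastFind_ne_empty {k : String} {cs : List String} {v : String}
    (hk : k ≠ "") (h : lastFind k cs = some v) : v ≠ "" := by
  intro hv
  apply hk
  have hl := lastFind_lower h
  rw [hv] at hl
  rw [← hl]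
  decide

-- the dict built by A's comprehension looks up to lastFind
theorem dict_foldl_get (k : String) : ∀ (cs : List String) (d : PySem.Dict String String),
    (cs.foldl (fun d c => d.insert (pvNorm c) (PySem.Str.strip c)) d).get? k =
      match lastFind k cs with
      | some v => some v
      | none => d.get? k := by
  intro cs
  induction cs with
  | nil => intro d; simp [lastFind]
  | cons c cs ih =>
    intro d
    rw [List.foldl_cons, ih]
    by_cases hn : pvNorm c = k
    · rw [lastFind_cons_eq cs hn]
      cases hf : lastFind k cs with
      | some v => simp [hf]
      | none => simp [hf, ← hn, PySem.Dict.get?_insert_self]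
    · rw [lastFind_cons_ne cs hn]
      cases hf : lastFind k cs with
      | some v => simp [hf]
      | none => simp [hf, PySem.Dict.get?_insert_of_ne _ _ (fun h => hn h.symm)]

-- the exact-hit part of B's step
def eStep (st : Int × Option String) (c : String) : Int × Option String :=
  match PySem.List.index? ["date", "monthly", "yyyy_mm", "month"] (pvNorm c) with
  | some r => if (r : Int) ≤ st.1 then ((r : Int), some (PySem.Str.strip c)) else st
  | none => st

-- B's fold splits into the exact part and the first-substring part
def fsStep (fs : Option String) (c : String) : Option String :=
  match fs with
  | some v => some v
  | none =>
    if PySem.Str.isIn "date" (pvNorm c) || PySem.Str.isIn "month" (pvNorm c) then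
      some (PySem.Str.strip c)
    else none

theorem bStep_eq (br : Int) (be fs : Option String) (c : String) :
    bStep (br, be, fs) c = ((eStep (br, be) c).1, (eStep (br, be) c).2, fsStep fs c) := by
  simp only [bStep, eStep, fsStep, pvNorm]
  cases fs <;> cases hr : PySem.List.index? ["date", "monthly", "yyyy_mm", "month"]
      (PySem.Str.lower (PySem.Str.strip c)) <;> simp [hr] <;> split <;> rfl

theorem bStep_split : ∀ (cs : List String) (br : Int) (be fs : Option String),
    cs.foldl bStep (br, be, fs) =
      ((cs.foldl eStep (br, be)).1, (cs.foldl eStep (br, be)).2,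
       match fs with
       | some v => some v
       | none => aSubLoop cs) := by
  intro cs
  induction cs with
  | nil => intro br be fs; cases fs <;> rfl
  | cons c cs ih =>
    intro br be fs
    rw [List.foldl_cons, List.foldl_cons, bStep_eq, ih]
    simp only [Prod.mk.eta]
    cases fs with
    | some v => rfl
    | none =>
      simp [fsStep, aSubLoop]
      by_cases hc : PySem.Chars.isIn ['d', 'a', 't', 'e'] (pvNorm c).toList = true ∨
          PySem.Chars.isIn ['m', 'o', 'n', 't', 'h'] (pvNorm c).toList = true
      · simp [hc]
      · simp [hc]

-- the cascade the exact fold computes, phrased through lastFind at the four candidates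
def cascade (cs : List String) (br : Int) (be : Option String) : Int × Option String :=
  match lastFind "date" cs with
  | some v => if (0 : Int) ≤ br then (0, some v) else (br, be)
  | none =>
    match lastFind "monthly" cs with
    | some v => if (1 : Int) ≤ br then (1, some v) else (br, be)
    | none =>
      match lastFind "yyyy_mm" cs with
      | some v => if (2 : Int) ≤ br then (2, some v) else (br, be)
      | none =>
        match lastFind "month" cs with
        | some v => if (3 : Int) ≤ br then (3, some v) else (br, be)
        | none => (br, be)

set_option maxHeartbeats 1000000 in
theorem eFold_eq_cascade : ∀ (cs : List String) (br : Int) (be : Option String),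
    cs.foldl eStep (br, be) = cascade cs br be := by
  intro cs
  induction cs with
  | nil => intro br be; simp [cascade, lastFind]
  | cons c cs ih =>
    intro br be
    rw [List.foldl_cons]
    show cs.foldl eStep (eStep (br, be) c) = _
    cases hr : PySem.List.index? ["date", "monthly", "yyyy_mm", "month"] (pvNorm c) with
    | none =>
      have hmem : pvNorm c ∉ (["date", "monthly", "yyyy_mm", "month"] : List String) :=
        (PySem.List.index?_eq_none_iff _ _).mp hr
      simp only [List.mem_cons, List.not_mem_nil, or_false] at hmem
      push_neg at hmem
      simp only [eStep, hr]
      rw [ih]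
      unfold cascade
      rw [lastFind_cons_ne cs hmem.1, lastFind_cons_ne cs hmem.2.1,
          lastFind_cons_ne cs hmem.2.2.1, lastFind_cons_ne cs hmem.2.2.2]
    | some r =>
      obtain ⟨hk, hkeq, -⟩ := PySem.List.getElem_of_index?_eq_some hr
      have hk4 : r < 4 := by simpa using hk
      simp only [eStep, hr]
      interval_cases r
      · have h0 : pvNorm c = "date" := by simpa using hkeq.symm
        have h1 : pvNorm c ≠ "monthly" := by rw [h0]; decide
        have h2 : pvNorm c ≠ "yyyy_mm" := by rw [h0]; decide
        have h3 : pvNorm c ≠ "month" := by rw [h0]; decide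
        split <;> rw [ih] <;> unfold cascade <;>
          rw [lastFind_cons_eq cs h0, lastFind_cons_ne cs h1,
              lastFind_cons_ne cs h2, lastFind_cons_ne cs h3] <;>
          rcases hf0 : lastFind "date" cs with _ | v0 <;>
          rcases hf1 : lastFind "monthly" cs with _ | v1 <;>
          rcases hf2 : lastFind "yyyy_mm" cs with _ | v2 <;>
          rcases hf3 : lastFind "month" cs with _ | v3 <;>
          simp [hf0, hf1, hf2, hf3] <;> (try split_ifs) <;> first | rfl | omega | simp_all
      · have h1 : pvNorm c = "monthly" := by simpa using hkeq.symm
        have h0 : pvNorm c ≠ "date" := by rw [h1]; decide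
        have h2 : pvNorm c ≠ "yyyy_mm" := by rw [h1]; decide
        have h3 : pvNorm c ≠ "month" := by rw [h1]; decide
        split <;> rw [ih] <;> unfold cascade <;>
          rw [lastFind_cons_ne cs h0, lastFind_cons_eq cs h1,
              lastFind_cons_ne cs h2, lastFind_cons_ne cs h3] <;>
          rcases hf0 : lastFind "date" cs with _ | v0 <;>
          rcases hf1 : lastFind "monthly" cs with _ | v1 <;>
          rcases hf2 : lastFind "yyyy_mm" cs with _ | v2 <;>
          rcases hf3 : lastFind "month" cs with _ | v3 <;>
          simp [hf0, hf1, hf2, hf3] <;> (try split_ifs) <;> first | rfl | omega | simp_all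
      · have h2 : pvNorm c = "yyyy_mm" := by simpa using hkeq.symm
        have h0 : pvNorm c ≠ "date" := by rw [h2]; decide
        have h1 : pvNorm c ≠ "monthly" := by rw [h2]; decide
        have h3 : pvNorm c ≠ "month" := by rw [h2]; decide
        split <;> rw [ih] <;> unfold cascade <;>
          rw [lastFind_cons_ne cs h0, lastFind_cons_ne cs h1,
              lastFind_cons_eq cs h2, lastFind_cons_ne cs h3] <;>
          rcases hf0 : lastFind "date" cs with _ | v0 <;>
          rcases hf1 : lastFind "monthly" cs with _ | v1 <;>
          rcases hf2 : lastFind "yyyy_mm" cs with _ | v2 <;>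
          rcases hf3 : lastFind "month" cs with _ | v3 <;>
          simp [hf0, hf1, hf2, hf3] <;> (try split_ifs) <;> first | rfl | omega | simp_all
      · have h3 : pvNorm c = "month" := by simpa using hkeq.symm
        have h0 : pvNorm c ≠ "date" := by rw [h3]; decide
        have h1 : pvNorm c ≠ "monthly" := by rw [h3]; decide
        have h2 : pvNorm c ≠ "yyyy_mm" := by rw [h3]; decide
        split <;> rw [ih] <;> unfold cascade <;>
          rw [lastFind_cons_ne cs h0, lastFind_cons_ne cs h1,
              lastFind_cons_ne cs h2, lastFind_cons_eq cs h3] <;>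
          rcases hf0 : lastFind "date" cs with _ | v0 <;>
          rcases hf1 : lastFind "monthly" cs with _ | v1 <;>
          rcases hf2 : lastFind "yyyy_mm" cs with _ | v2 <;>
          rcases hf3 : lastFind "month" cs with _ | v3 <;>
          simp [hf0, hf1, hf2, hf3] <;> (try split_ifs) <;> first | rfl | omega | simp_all

-- ===== VERDICT (by name: the statement is the Claim_ definition above) =====
set_option maxHeartbeats 1000000 in
theorem pick_month_column_py_spec : Claim_equal_pick_month_column_py := by
  intro cs _
  unfold Spec_pick_month_column_py
  by_cases h : cs = []
  · simp [pick_month_column_py, pick_month_column_py_alt, h]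
  · simp only [pick_month_column_py, pick_month_column_py_alt, if_neg h]
    rw [bStep_split, eFold_eq_cascade]
    have g : ∀ k, (cs.foldl (fun d c => d.insert (pvNorm c) (PySem.Str.strip c))
        PySem.Dict.empty).get? k = lastFind k cs := by
      intro k; rw [dict_foldl_get]; cases hf : lastFind k cs <;> simp [hf]
    simp only [aCandLoop, g]
    unfold cascade
    rcases hf0 : lastFind "date" cs with _ | v0 <;>
    rcases hf1 : lastFind "monthly" cs with _ | v1 <;>
    rcases hf2 : lastFind "yyyy_mm" cs with _ | v2 <;>
    rcases hf3 : lastFind "month" cs with _ | v3 <;>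
    (try have n0 : v0 ≠ "" := lastFind_ne_empty (by decide) hf0) <;>
    (try have n1 : v1 ≠ "" := lastFind_ne_empty (by decide) hf1) <;>
    (try have n2 : v2 ≠ "" := lastFind_ne_empty (by decide) hf2) <;>
    (try have n3 : v3 ≠ "" := lastFind_ne_empty (by decide) hf3) <;>
    simp [hf0, hf1, hf2, hf3, *]
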